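-- pv_equiv track=rewrite | github.com/royadityak94/InterviewPrep | Grokking/SlidingWindow/longest_subarray_with_ones_after_replacement.py | longest_subarray_with_ones_after_replacement
-- ===== SOURCE A (Python) =====
-- def longest_subarray_with_ones_after_replacement(input_arr, k):
--     # Runtime Complexity : O(N), Space Complexity: O(1)
--     max_length = 0
--     window_start = 0
--     maxOnesCount = 0
--
--     for window_end in range(len(input_arr)):
--         maxOnesCount = max(maxOnesCount, input_arr[window_start:window_end+1].count(1))
--
--         if (window_end-window_start+1-maxOnesCount) > k:
--             window_start += 1
--
--         max_length = max(max_length, window_end-window_start+1)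
--     return max_length
-- ===== SOURCE B (Python) =====
-- def longest_subarray_with_ones_after_replacement(input_arr, k):
--     # Incremental window counter: no per-step slice recount -> O(N) instead of O(N^2).
--     max_length = 0
--     window_start = 0
--     ones_in_window = 0
--     max_ones = 0
--     for window_end in range(len(input_arr)):
--         if input_arr[window_end] == 1:
--             ones_in_window += 1
--         if ones_in_window > max_ones:
--             max_ones = ones_in_window
--         if window_end - window_start + 1 - max_ones > k:
--             if input_arr[window_start] == 1:
--                 ones_in_window -= 1
--             window_start += 1
--         if window_end - window_start + 1 > max_length:
--             max_length = window_end - window_start + 1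
--     return max_length
-- ===== Notes on version B (the rewrite author's own statement) =====
-- stated objective: faster
-- what changed: B maintains the count of ones in the sliding window incrementally (add the entering element, subtract the leaving one) instead of re-slicing and recounting the whole window at every step.
import Mathlib
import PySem

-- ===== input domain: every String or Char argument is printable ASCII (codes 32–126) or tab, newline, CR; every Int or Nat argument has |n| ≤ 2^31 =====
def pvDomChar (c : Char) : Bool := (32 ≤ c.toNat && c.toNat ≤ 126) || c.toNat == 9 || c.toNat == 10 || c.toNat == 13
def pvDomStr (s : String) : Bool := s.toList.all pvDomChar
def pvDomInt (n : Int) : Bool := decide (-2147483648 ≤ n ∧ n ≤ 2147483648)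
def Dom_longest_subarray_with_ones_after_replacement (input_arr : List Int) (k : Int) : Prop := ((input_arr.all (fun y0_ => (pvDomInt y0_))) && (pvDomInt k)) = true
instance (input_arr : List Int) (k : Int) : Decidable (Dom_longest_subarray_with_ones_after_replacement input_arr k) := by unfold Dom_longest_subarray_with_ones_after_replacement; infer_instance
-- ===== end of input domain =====

-- B replaces A's per-step slice recount by an incrementally maintained ones counter (objective: faster, O(N) vs O(N^2)).

-- ===== PORT A =====
-- loop body of A, one iteration of the for-loop; state = (max_length, window_start, maxOnesCount)
def pvStepA (input_arr : List Int) (k : Int) (s : Int × Int × Int) (window_end : Int) : Int × Int × Int :=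
  let max_length := s.1
  let window_start := s.2.1
  let maxOnesCount := s.2.2
  let maxOnesCount := max maxOnesCount
    (((PySem.List.slice input_arr (some window_start) (some (window_end + 1))).count 1 : Int))
  let window_start := if window_end - window_start + 1 - maxOnesCount > k then window_start + 1 else window_start
  let max_length := max max_length (window_end - window_start + 1)
  (max_length, window_start, maxOnesCount)

def longest_subarray_with_ones_after_replacement (input_arr : List Int) (k : Int) : Int :=
  ((PySem.List.pyRange 0 (input_arr.length : Int) 1).foldl (pvStepA input_arr k) (0, 0, 0)).1

-- ===== PORT B =====
-- loop body of B; state = (max_length, window_start, ones_in_window, max_ones)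
-- indexing: window_end and window_start are always valid indices here, so pyGetD's default is never read
def pvStepB (input_arr : List Int) (k : Int) (s : Int × Int × Int × Int) (window_end : Int) : Int × Int × Int × Int :=
  let max_length := s.1
  let window_start := s.2.1
  let ones := s.2.2.1
  let max_ones := s.2.2.2
  let ones := if PySem.List.pyGetD input_arr window_end 0 = 1 then ones + 1 else ones
  let max_ones := if ones > max_ones then ones else max_ones
  let s2 := if window_end - window_start + 1 - max_ones > k then
      (window_start + 1, if PySem.List.pyGetD input_arr window_start 0 = 1 then ones - 1 else ones)
    else (window_start, ones)
  let window_start := s2.1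
  let ones := s2.2
  let max_length := if window_end - window_start + 1 > max_length then window_end - window_start + 1 else max_length
  (max_length, window_start, ones, max_ones)

def longest_subarray_with_ones_after_replacement_alt (input_arr : List Int) (k : Int) : Int :=
  ((PySem.List.pyRange 0 (input_arr.length : Int) 1).foldl (pvStepB input_arr k) (0, 0, 0, 0)).1

-- ===== PRECONDITION & SPEC =====
def Spec_longest_subarray_with_ones_after_replacement (input_arr : List Int) (k : Int) (out : Int) : Prop := out = longest_subarray_with_ones_after_replacement_alt input_arr k
instance (input_arr : List Int) (k : Int) (out : Int) : Decidable (Spec_longest_subarray_with_ones_after_replacement input_arr k out) := by unfold Spec_longest_subarray_with_ones_after_replacement; infer_instance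

-- ===== CLAIM (what is proved, stated in full; the proofs are below) =====
def Claim_equal_longest_subarray_with_ones_after_replacement : Prop := ∀ (input_arr : List Int) (k : Int), Dom_longest_subarray_with_ones_after_replacement input_arr k → Spec_longest_subarray_with_ones_after_replacement input_arr k (longest_subarray_with_ones_after_replacement input_arr k)

-- ===== LEMMAS AND PROOFS =====

-- adding element e on the right of the window [w, e)
lemma pv_count_take_succ (arr : List Int) (w e : Nat) (hwe : w ≤ e) (he : e < arr.length) :
    ((arr.drop w).take (e + 1 - w)).count 1
      = ((arr.drop w).take (e - w)).count 1 + (if arr.getD e 0 = 1 then 1 else 0) := by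
  have h1 : e + 1 - w = (e - w) + 1 := by omega
  have h2 : (arr.drop w)[e - w]? = some arr[e] := by
    rw [List.getElem?_drop]
    have : w + (e - w) = e := by omega
    rw [this, List.getElem?_eq_getElem he]
  have hg : arr.getD e 0 = arr[e] := by
    simp [List.getD_eq_getElem?_getD, List.getElem?_eq_getElem he]
  rw [h1, List.take_add_one, List.count_append, h2, hg]
  simp [List.count_singleton]

-- removing element w on the left of the window [w, e+1)
lemma pv_count_drop_succ (arr : List Int) (w e : Nat) (hwe : w ≤ e) (hw : w < arr.length) :
    ((arr.drop w).take (e + 1 - w)).count 1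
      = (if arr.getD w 0 = 1 then 1 else 0) + ((arr.drop (w + 1)).take (e - w)).count 1 := by
  have h1 : e + 1 - w = (e - w) + 1 := by omega
  have hg : arr.getD w 0 = arr[w] := by
    simp [List.getD_eq_getElem?_getD, List.getElem?_eq_getElem hw]
  rw [h1, List.drop_eq_getElem_cons hw, List.take_succ_cons, List.count_cons, hg]
  simp [Nat.add_comm]

-- the loop invariant: after processing range(e), both states share (max_length, window_start,
-- maxOnesCount = max_ones), and B's ones counter equals the ones count of the current window
lemma pv_invariant (arr : List Int) (k : Int) :
    ∀ (e : Nat), e ≤ arr.length →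
      ∃ (w : Nat) (ml oc : Int),
        w ≤ e ∧
        (PySem.List.pyRange 0 (e : Int) 1).foldl (pvStepA arr k) (0, 0, 0) = (ml, (w : Int), oc) ∧
        (PySem.List.pyRange 0 (e : Int) 1).foldl (pvStepB arr k) (0, 0, 0, 0)
          = (ml, (w : Int), (((arr.drop w).take (e - w)).count 1 : Int), oc) := by
  intro e
  induction e with
  | zero =>
    intro _
    exact ⟨0, 0, 0, le_refl 0, by simp [PySem.List.pyRange_one_eq_nil], by simp [PySem.List.pyRange_one_eq_nil]⟩
  | succ e ih =>
    intro hle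
    obtain ⟨w, ml, oc, hwe, hA, hB⟩ := ih (by omega)
    have hrange : PySem.List.pyRange 0 ((e + 1 : Nat) : Int) 1
        = PySem.List.pyRange 0 (e : Int) 1 ++ [(e : Int)] := by
      push_cast
      exact PySem.List.pyRange_one_succ_right (by positivity)
    have helen : e < arr.length := by omega
    -- the new right element, seen by both programs
    have hgetE : PySem.List.pyGetD arr (e : Int) 0 = arr.getD e 0 := by
      simp [PySem.List.pyGetD_natCast]
    have hgetW : PySem.List.pyGetD arr (w : Int) 0 = arr.getD w 0 := by
      simp [PySem.List.pyGetD_natCast]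
    -- A's recounted slice at step e equals the extended window count
    have hslice : PySem.List.slice arr (some (w : Int)) (some ((e : Int) + 1))
        = (arr.drop w).take (e + 1 - w) := by
      have : ((e : Int) + 1) = ((e + 1 : Nat) : Int) := by push_cast; ring
      rw [this, PySem.List.slice_natCast]
    have hcnt := pv_count_take_succ arr w e hwe helen
    rw [hrange, List.foldl_append, List.foldl_cons, List.foldl_nil, hA,
        List.foldl_append, List.foldl_cons, List.foldl_nil, hB]
    -- unfold one step of each loop
    simp only [pvStepA, pvStepB, hslice, hgetE, hgetW]
    -- B's incremented counter equals A's fresh slice count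
    have hones : (if arr.getD e 0 = 1
          then (((arr.drop w).take (e - w)).count 1 : Int) + 1
          else (((arr.drop w).take (e - w)).count 1 : Int))
        = (((arr.drop w).take (e + 1 - w)).count 1 : Int) := by
      rw [hcnt]; split <;> push_cast <;> simp_all
    by_cases hcond : (e : Int) - (w : Int) + 1 -
        (max oc (((arr.drop w).take (e + 1 - w)).count 1 : Int)) > k
    · -- shrink: window_start advances, B removes arr[w] from its counter
      refine ⟨w + 1, max ml ((e : Int) - ((w : Int) + 1) + 1),
        max oc (((arr.drop w).take (e + 1 - w)).count 1 : Int), by omega, ?_, ?_⟩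
      · simp only [hcond, if_pos]
        push_cast; ring_nf
      · have hcnt2 := pv_count_drop_succ arr w e hwe (by omega)
        have hones2 : (if arr.getD w 0 = 1
              then (((arr.drop w).take (e + 1 - w)).count 1 : Int) - 1
              else (((arr.drop w).take (e + 1 - w)).count 1 : Int))
            = (((arr.drop (w + 1)).take (e + 1 - (w + 1))).count 1 : Int) := by
          have h3 : e + 1 - (w + 1) = e - w := by omega
          rw [h3, hcnt2]; split <;> push_cast <;> simp_all
        rw [hones]
        have hmax : (if (((arr.drop w).take (e + 1 - w)).count 1 : Int) > oc
              then (((arr.drop w).take (e + 1 - w)).count 1 : Int) else oc)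
            = max oc (((arr.drop w).take (e + 1 - w)).count 1 : Int) := by omega
        rw [hmax]
        simp only [hcond, if_pos]
        rw [hones2]
        have : (if (e : Int) - ((w : Int) + 1) + 1 > ml then (e : Int) - ((w : Int) + 1) + 1 else ml)
            = max ml ((e : Int) - ((w : Int) + 1) + 1) := by omega
        rw [this]
        push_cast; ring_nf
    · -- no shrink
      refine ⟨w, max ml ((e : Int) - (w : Int) + 1),
        max oc (((arr.drop w).take (e + 1 - w)).count 1 : Int), by omega, ?_, ?_⟩
      · simp only [hcond, if_false]
      · rw [hones]
        have hmax : (if (((arr.drop w).take (e + 1 - w)).count 1 : Int) > oc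
              then (((arr.drop w).take (e + 1 - w)).count 1 : Int) else oc)
            = max oc (((arr.drop w).take (e + 1 - w)).count 1 : Int) := by omega
        rw [hmax]
        simp only [hcond, if_false]
        have : (if (e : Int) - (w : Int) + 1 > ml then (e : Int) - (w : Int) + 1 else ml)
            = max ml ((e : Int) - (w : Int) + 1) := by omega
        rw [this]

-- ===== VERDICT (by name: the statement is the Claim_ definition above) =====
theorem longest_subarray_with_ones_after_replacement_spec : Claim_equal_longest_subarray_with_ones_after_replacement := by
  intro input_arr k _
  unfold Spec_longest_subarray_with_ones_after_replacement
  unfold longest_subarray_with_ones_after_replacement longest_subarray_with_ones_after_replacement_alt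
  obtain ⟨w, ml, oc, _, hA, hB⟩ := pv_invariant input_arr k input_arr.length (le_refl _)
  rw [hA, hB]
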